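-- pv_equiv track=rewrite | github.com/stephen-golban/review | scripts/detectors.py | _categorize_pkg
-- ===== SOURCE A (Python) =====
-- from typing import Any, Callable, Dict, Optional
--
-- FRAMEWORK_PKGS = {
--     "react", "vue", "angular", "@angular/core", "svelte", "next", "nuxt",
--     "remix", "astro", "solid-js", "qwik", "express", "fastify", "koa",
--     "hono", "@nestjs/core", "nest", "@nestjs/common",
-- }
--
-- UI_LIBRARY_PKGS = {
--     "@mui/material", "@chakra-ui/react", "antd", "@headlessui/react",
--     "tailwindcss", "nativewind", "styled-components", "shadcn",
-- }
--
-- UI_LIBRARY_PREFIXES = ("@radix-ui/", "@emotion/")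
--
-- STATE_MGMT_PKGS = {
--     "zustand", "redux", "@reduxjs/toolkit", "recoil", "jotai", "valtio",
--     "mobx", "pinia", "vuex", "xstate",
-- }
--
-- DATA_FETCHING_PKGS = {
--     "@tanstack/react-query", "swr", "apollo", "@apollo/client", "urql",
--     "@trpc/client", "@trpc/server", "trpc", "axios", "ky", "got",
-- }
--
-- TESTING_PKGS = {
--     "jest", "vitest", "mocha", "cypress", "playwright",
--     "@playwright/test", "pytest",
-- }
--
-- TESTING_PREFIXES = ("@testing-library/",)
--
-- BUILD_TOOL_PKGS = {
--     "vite", "webpack", "esbuild", "turbo", "nx", "rollup", "parcel",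
--     "tsup", "unbuild",
-- }
--
-- ORM_DB_PKGS = {
--     "prisma", "@prisma/client", "drizzle-orm", "typeorm", "sequelize",
--     "knex", "mongoose",
-- }
--
-- LINTING_PKGS = {
--     "eslint", "prettier", "biome", "@biomejs/biome", "stylelint",
--     "oxlint",
-- }
--
-- CSS_STYLING_PKGS = {
--     "tailwindcss", "sass", "less", "postcss", "styled-components",
--     "nativewind",
-- }
--
-- CSS_STYLING_PREFIXES = ("@emotion/",)
--
-- def _categorize_pkg(name: str) -> Optional[str]:
--     """Return category string for a known package, or None to skip."""
--     if name in FRAMEWORK_PKGS: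
--         return "framework"
--     if name in UI_LIBRARY_PKGS or any(name.startswith(p) for p in UI_LIBRARY_PREFIXES):
--         return "ui-library"
--     if name in STATE_MGMT_PKGS:
--         return "state-management"
--     if name in DATA_FETCHING_PKGS:
--         return "data-fetching"
--     if name in TESTING_PKGS or any(name.startswith(p) for p in TESTING_PREFIXES):
--         return "testing"
--     if name in BUILD_TOOL_PKGS:
--         return "build-tool"
--     if name in ORM_DB_PKGS:
--         return "orm/database"
--     if name in LINTING_PKGS:
--         return "linting"
--     if name in CSS_STYLING_PKGS or any(name.startswith(p) for p in CSS_STYLING_PREFIXES):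
--         return "css/styling"
--     return None
-- ===== SOURCE B (Python) =====
-- from typing import Optional
--
-- # One exact-name table built once, in priority order (first category wins for
-- # duplicates like tailwindcss / styled-components / nativewind), plus one
-- # ordered prefix table.
-- _GROUPS = [
--     ("framework", ["react", "vue", "angular", "@angular/core", "svelte", "next",
--                    "nuxt", "remix", "astro", "solid-js", "qwik", "express",
--                    "fastify", "koa", "hono", "@nestjs/core", "nest",
--                    "@nestjs/common"]),
--     ("ui-library", ["@mui/material", "@chakra-ui/react", "antd",
--                     "@headlessui/react", "tailwindcss", "nativewind",
--                     "styled-components", "shadcn"]),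
--     ("state-management", ["zustand", "redux", "@reduxjs/toolkit", "recoil",
--                           "jotai", "valtio", "mobx", "pinia", "vuex", "xstate"]),
--     ("data-fetching", ["@tanstack/react-query", "swr", "apollo",
--                        "@apollo/client", "urql", "@trpc/client", "@trpc/server",
--                        "trpc", "axios", "ky", "got"]),
--     ("testing", ["jest", "vitest", "mocha", "cypress", "playwright",
--                  "@playwright/test", "pytest"]),
--     ("build-tool", ["vite", "webpack", "esbuild", "turbo", "nx", "rollup",
--                     "parcel", "tsup", "unbuild"]),
--     ("orm/database", ["prisma", "@prisma/client", "drizzle-orm", "typeorm",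
--                       "sequelize", "knex", "mongoose"]),
--     ("linting", ["eslint", "prettier", "biome", "@biomejs/biome", "stylelint",
--                  "oxlint"]),
--     ("css/styling", ["tailwindcss", "sass", "less", "postcss",
--                      "styled-components", "nativewind"]),
-- ]
--
-- CATEGORY_BY_NAME = {}
-- for _cat, _names in _GROUPS:
--     for _n in _names:
--         CATEGORY_BY_NAME.setdefault(_n, _cat)
--
-- PREFIX_CATEGORIES = [
--     ("@radix-ui/", "ui-library"),
--     ("@emotion/", "ui-library"),
--     ("@testing-library/", "testing"),
--     ("@emotion/", "css/styling"),
-- ]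
--
-- def _categorize_pkg(name: str) -> Optional[str]:
--     """Return category string for a known package, or None to skip."""
--     cat = CATEGORY_BY_NAME.get(name)
--     if cat is not None:
--         return cat
--     for prefix, pcat in PREFIX_CATEGORIES:
--         if name.startswith(prefix):
--             return pcat
--     return None
-- ===== Notes on version B (the rewrite author's own statement) =====
-- stated objective: idiomatic
-- what changed: Replaces A's nine sequential set-membership/prefix branch checks by a single exact-name dict built once in priority order (setdefault keeps the first category for duplicates like tailwindcss) plus one ordered prefix table scanned for the first match.
import Mathlib
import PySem

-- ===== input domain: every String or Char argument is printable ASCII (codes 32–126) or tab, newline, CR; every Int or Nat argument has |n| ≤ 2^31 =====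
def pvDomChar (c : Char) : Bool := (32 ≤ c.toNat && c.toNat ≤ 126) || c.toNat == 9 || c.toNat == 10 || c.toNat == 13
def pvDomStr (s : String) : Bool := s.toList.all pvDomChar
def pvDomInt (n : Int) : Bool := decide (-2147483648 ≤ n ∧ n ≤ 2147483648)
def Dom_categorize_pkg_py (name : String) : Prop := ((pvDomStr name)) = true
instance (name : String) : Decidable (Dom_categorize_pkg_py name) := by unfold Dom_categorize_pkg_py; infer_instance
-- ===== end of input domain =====

set_option maxRecDepth 8000
set_option maxHeartbeats 2000000

-- B replaces A's nine sequential set-membership checks by one precomputed exact-name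
-- dict (built once, first category wins) plus one ordered prefix table (objective: idiomatic).

-- ===== PORT A =====
def pvFRAMEWORK_PKGS : PySem.Set String := PySem.Set.ofList ["react", "vue", "angular", "@angular/core", "svelte", "next", "nuxt", "remix", "astro", "solid-js", "qwik", "express", "fastify", "koa", "hono", "@nestjs/core", "nest", "@nestjs/common"]
def pvUI_LIBRARY_PKGS : PySem.Set String := PySem.Set.ofList ["@mui/material", "@chakra-ui/react", "antd", "@headlessui/react", "tailwindcss", "nativewind", "styled-components", "shadcn"]
def pvUI_LIBRARY_PREFIXES : List String := ["@radix-ui/", "@emotion/"]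
def pvSTATE_MGMT_PKGS : PySem.Set String := PySem.Set.ofList ["zustand", "redux", "@reduxjs/toolkit", "recoil", "jotai", "valtio", "mobx", "pinia", "vuex", "xstate"]
def pvDATA_FETCHING_PKGS : PySem.Set String := PySem.Set.ofList ["@tanstack/react-query", "swr", "apollo", "@apollo/client", "urql", "@trpc/client", "@trpc/server", "trpc", "axios", "ky", "got"]
def pvTESTING_PKGS : PySem.Set String := PySem.Set.ofList ["jest", "vitest", "mocha", "cypress", "playwright", "@playwright/test", "pytest"]
def pvTESTING_PREFIXES : List String := ["@testing-library/"]
def pvBUILD_TOOL_PKGS : PySem.Set String := PySem.Set.ofList ["vite", "webpack", "esbuild", "turbo", "nx", "rollup", "parcel", "tsup", "unbuild"]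
def pvORM_DB_PKGS : PySem.Set String := PySem.Set.ofList ["prisma", "@prisma/client", "drizzle-orm", "typeorm", "sequelize", "knex", "mongoose"]
def pvLINTING_PKGS : PySem.Set String := PySem.Set.ofList ["eslint", "prettier", "biome", "@biomejs/biome", "stylelint", "oxlint"]
def pvCSS_STYLING_PKGS : PySem.Set String := PySem.Set.ofList ["tailwindcss", "sass", "less", "postcss", "styled-components", "nativewind"]
def pvCSS_STYLING_PREFIXES : List String := ["@emotion/"]

def categorize_pkg_py (name : String) : Option String :=
  if pvFRAMEWORK_PKGS.contains name then some "framework"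
  else if pvUI_LIBRARY_PKGS.contains name || pvUI_LIBRARY_PREFIXES.any (fun p => PySem.Str.startswith name p) then some "ui-library"
  else if pvSTATE_MGMT_PKGS.contains name then some "state-management"
  else if pvDATA_FETCHING_PKGS.contains name then some "data-fetching"
  else if pvTESTING_PKGS.contains name || pvTESTING_PREFIXES.any (fun p => PySem.Str.startswith name p) then some "testing"
  else if pvBUILD_TOOL_PKGS.contains name then some "build-tool"
  else if pvORM_DB_PKGS.contains name then some "orm/database"
  else if pvLINTING_PKGS.contains name then some "linting"
  else if pvCSS_STYLING_PKGS.contains name || pvCSS_STYLING_PREFIXES.any (fun p => PySem.Str.startswith name p) then some "css/styling"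
  else none

-- ===== PORT B =====
def pvGROUPS : List (String × List String) :=
  [("framework", ["react", "vue", "angular", "@angular/core", "svelte", "next", "nuxt", "remix", "astro", "solid-js", "qwik", "express", "fastify", "koa", "hono", "@nestjs/core", "nest", "@nestjs/common"]),
  ("ui-library", ["@mui/material", "@chakra-ui/react", "antd", "@headlessui/react", "tailwindcss", "nativewind", "styled-components", "shadcn"]),
  ("state-management", ["zustand", "redux", "@reduxjs/toolkit", "recoil", "jotai", "valtio", "mobx", "pinia", "vuex", "xstate"]),
  ("data-fetching", ["@tanstack/react-query", "swr", "apollo", "@apollo/client", "urql", "@trpc/client", "@trpc/server", "trpc", "axios", "ky", "got"]),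
  ("testing", ["jest", "vitest", "mocha", "cypress", "playwright", "@playwright/test", "pytest"]),
  ("build-tool", ["vite", "webpack", "esbuild", "turbo", "nx", "rollup", "parcel", "tsup", "unbuild"]),
  ("orm/database", ["prisma", "@prisma/client", "drizzle-orm", "typeorm", "sequelize", "knex", "mongoose"]),
  ("linting", ["eslint", "prettier", "biome", "@biomejs/biome", "stylelint", "oxlint"]),
  ("css/styling", ["tailwindcss", "sass", "less", "postcss", "styled-components", "nativewind"])]

def pvCATEGORY_BY_NAME : PySem.Dict String String :=
  pvGROUPS.foldl (fun d g => g.2.foldl (fun d n => d.setdefault n g.1) d) PySem.Dict.empty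

def pvPREFIX_CATEGORIES : List (String × String) :=
  [("@radix-ui/", "ui-library"), ("@emotion/", "ui-library"),
   ("@testing-library/", "testing"), ("@emotion/", "css/styling")]

def categorize_pkg_py_alt (name : String) : Option String :=
  match pvCATEGORY_BY_NAME.get? name with
  | some cat => some cat
  | none => (pvPREFIX_CATEGORIES.find? (fun pc => PySem.Str.startswith name pc.1)).map (·.2)

-- ===== PRECONDITION & SPEC =====
def Spec_categorize_pkg_py (name : String) (out : Option String) : Prop := out = categorize_pkg_py_alt name
instance (name : String) (out : Option String) : Decidable (Spec_categorize_pkg_py name out) := by unfold Spec_categorize_pkg_py; infer_instance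

-- ===== CLAIM (what is proved, stated in full; the proofs are below) =====
def Claim_equal_categorize_pkg_py : Prop := ∀ (name : String), Dom_categorize_pkg_py name → Spec_categorize_pkg_py name (categorize_pkg_py name)

-- ===== LEMMAS AND PROOFS =====
-- the distinct exact names of both programs, in B's insertion order
def pvAllNames : List String := ["react", "vue", "angular", "@angular/core", "svelte", "next", "nuxt", "remix", "astro", "solid-js", "qwik", "express", "fastify", "koa", "hono", "@nestjs/core", "nest", "@nestjs/common", "@mui/material", "@chakra-ui/react", "antd", "@headlessui/react", "tailwindcss", "nativewind", "styled-components", "shadcn", "zustand", "redux", "@reduxjs/toolkit", "recoil", "jotai", "valtio", "mobx", "pinia", "vuex", "xstate", "@tanstack/react-query", "swr", "apollo", "@apollo/client", "urql", "@trpc/client", "@trpc/server", "trpc", "axios", "ky", "got", "jest", "vitest", "mocha", "cypress", "playwright", "@playwright/test", "pytest", "vite", "webpack", "esbuild", "turbo", "nx", "rollup", "parcel", "tsup", "unbuild", "prisma", "@prisma/client", "drizzle-orm", "typeorm", "sequelize", "knex", "mongoose", "eslint", "prettier", "biome", "@biomejs/biome", "stylelint", "oxlint", "sass", "less", "postcs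s"]

-- B's dict and A's sets in normal form (the folds evaluated once)
theorem pvCATEGORY_BY_NAME_eq : pvCATEGORY_BY_NAME = PySem.Dict.mk [("react", "framework"), ("vue", "framework"), ("angular", "framework"), ("@angular/core", "framework"), ("svelte", "framework"), ("next", "framework"), ("nuxt", "framework"), ("remix", "framework"), ("astro", "framework"), ("solid-js", "framework"), ("qwik", "framework"), ("express", "framework"), ("fastify", "framework"), ("koa", "framework"), ("hono", "framework"), ("@nestjs/core", "framework"), ("nest", "framework"), ("@nestjs/common", "framework"), ("@mui/material", "ui-library"), ("@chakra-ui/react", "ui-library"), ("antd", "ui-library"), ("@headlessui/react", "ui-library"), ("tailwindcss", "ui-library"), ("nativewind", "ui-library"), ("styled-components", "ui-library"), ("shadcn", "ui-library"), ("zustand", "state-management"), ("redux", "state-management"), ("@reduxjs/toolkit", "state-management"), ("recoil", "state-management"), ("jotai", "state-management"), ("valtio", "state-management"), ("mobx", "state-management"), ("pinia", "state-management"), ("vuex", "state-management"), ("xstate", "state-management"), ("@tanstack/react-query", "data-fetching"), ("swr", "data-fetching"), ("apollo", "data-fetching"), ("@apollo/client", "data-fetching"), ("urql", "data-fetching"),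 ("@trpc/client", "data-fetching"), ("@trpc/server", "data-fetching"), ("trpc", "data-fetching"), ("axios", "data-fetching"), ("ky", "data-fetching"), ("got", "data-fetching"), ("jest", "testing"), ("vitest", "testing"), ("mocha", "testing"), ("cypress", "testing"), ("playwright", "testing"), ("@playwright/test", "testing"), ("pytest", "testing"), ("vite", "build-tool"), ("webpack", "build-tool"), ("esbuild", "build-tool"), ("turbo", "build-tool"), ("nx", "build-tool"), ("rollup", "build-tool"), ("parcel", "build-tool"), ("tsup", "build-tool"), ("unbuild", "build-tool"), ("prisma", "orm/database"), ("@prisma/client", "orm/database"), ("drizzle-orm", "orm/database"), ("typeorm", "orm/database"), ("sequelize", "orm/database"), ("knex", "orm/database"), ("mongoose", "orm/database"), ("eslint", "linting"), ("prettier", "linting"), ("biome", "linting"), ("@biomejs/biome", "linting"), ("stylelint", "linting"), ("oxlint", "linting"), ("sass", "css/styling"), ("less", "css/styling"), ("postcss", "css/styling")] := by decide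
theorem pvFRAMEWORK_PKGS_eq : pvFRAMEWORK_PKGS = (["react", "vue", "angular", "@angular/core", "svelte", "next", "nuxt", "remix", "astro", "solid-js", "qwik", "express", "fastify", "koa", "hono", "@nestjs/core", "nest", "@nestjs/common"] : PySem.Set String) := by decide
theorem pvUI_LIBRARY_PKGS_eq : pvUI_LIBRARY_PKGS = (["@mui/material", "@chakra-ui/react", "antd", "@headlessui/react", "tailwindcss", "nativewind", "styled-components", "shadcn"] : PySem.Set String) := by decide
theorem pvSTATE_MGMT_PKGS_eq : pvSTATE_MGMT_PKGS = (["zustand", "redux", "@reduxjs/toolkit", "recoil", "jotai", "valtio", "mobx", "pinia", "vuex", "xstate"] : PySem.Set String) := by decide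
theorem pvDATA_FETCHING_PKGS_eq : pvDATA_FETCHING_PKGS = (["@tanstack/react-query", "swr", "apollo", "@apollo/client", "urql", "@trpc/client", "@trpc/server", "trpc", "axios", "ky", "got"] : PySem.Set String) := by decide
theorem pvTESTING_PKGS_eq : pvTESTING_PKGS = (["jest", "vitest", "mocha", "cypress", "playwright", "@playwright/test", "pytest"] : PySem.Set String) := by decide
theorem pvBUILD_TOOL_PKGS_eq : pvBUILD_TOOL_PKGS = (["vite", "webpack", "esbuild", "turbo", "nx", "rollup", "parcel", "tsup", "unbuild"] : PySem.Set String) := by decide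
theorem pvORM_DB_PKGS_eq : pvORM_DB_PKGS = (["prisma", "@prisma/client", "drizzle-orm", "typeorm", "sequelize", "knex", "mongoose"] : PySem.Set String) := by decide
theorem pvLINTING_PKGS_eq : pvLINTING_PKGS = (["eslint", "prettier", "biome", "@biomejs/biome", "stylelint", "oxlint"] : PySem.Set String) := by decide
theorem pvCSS_STYLING_PKGS_eq : pvCSS_STYLING_PKGS = (["tailwindcss", "sass", "less", "postcss", "styled-components", "nativewind"] : PySem.Set String) := by decide

-- on every exact package name the two ports agree (checked name by name)
theorem pvAgree_mem : ∀ n ∈ pvAllNames, categorize_pkg_py n = categorize_pkg_py_alt n := by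
  simp only [categorize_pkg_py, categorize_pkg_py_alt, pvCATEGORY_BY_NAME_eq, pvFRAMEWORK_PKGS_eq, pvUI_LIBRARY_PKGS_eq, pvSTATE_MGMT_PKGS_eq, pvDATA_FETCHING_PKGS_eq, pvTESTING_PKGS_eq, pvBUILD_TOOL_PKGS_eq, pvORM_DB_PKGS_eq, pvLINTING_PKGS_eq, pvCSS_STYLING_PKGS_eq]
  decide

-- ===== VERDICT (by name: the statement is the Claim_ definition above) =====
theorem categorize_pkg_py_spec : Claim_equal_categorize_pkg_py := by
  intro name _
  unfold Spec_categorize_pkg_py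
  by_cases hmem : name ∈ pvAllNames
  · exact pvAgree_mem name hmem
  · simp only [pvAllNames, List.mem_cons, List.not_mem_nil, or_false, not_or] at hmem
    obtain ⟨h1, h2, h3, h4, h5, h6, h7, h8, h9, h10, h11, h12, h13, h14, h15, h16, h17, h18, h19, h20, h21, h22, h23, h24, h25, h26, h27, h28, h29, h30, h31, h32, h33, h34, h35, h36, h37, h38, h39, h40, h41, h42, h43, h44, h45, h46, h47, h48, h49, h50, h51, h52, h53, h54, h55, h56, h57, h58, h59, h60, h61, h62, h63, h64, h65, h66, h67, h68, h69, h70, h71, h72, h73, h74, h75, h76, h77, h78, h79⟩ := hmem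
    simp [categorize_pkg_py, categorize_pkg_py_alt, pvCATEGORY_BY_NAME_eq,
      pvFRAMEWORK_PKGS_eq, pvUI_LIBRARY_PKGS_eq, pvSTATE_MGMT_PKGS_eq, pvDATA_FETCHING_PKGS_eq, pvTESTING_PKGS_eq, pvBUILD_TOOL_PKGS_eq, pvORM_DB_PKGS_eq, pvLINTING_PKGS_eq, pvCSS_STYLING_PKGS_eq,
      pvUI_LIBRARY_PREFIXES, pvTESTING_PREFIXES, pvCSS_STYLING_PREFIXES, pvPREFIX_CATEGORIES,
      PySem.Dict.get?, PySem.Set.contains,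
      List.find?_cons,
      h1, Ne.symm h1, h2, Ne.symm h2, h3, Ne.symm h3, h4, Ne.symm h4, h5, Ne.symm h5, h6, Ne.symm h6, h7, Ne.symm h7, h8, Ne.symm h8, h9, Ne.symm h9, h10, Ne.symm h10, h11, Ne.symm h11, h12, Ne.symm h12, h13, Ne.symm h13, h14, Ne.symm h14, h15, Ne.symm h15, h16, Ne.symm h16, h17, Ne.symm h17, h18, Ne.symm h18, h19, Ne.symm h19, h20, Ne.symm h20, h21, Ne.symm h21, h22, Ne.symm h22, h23, Ne.symm h23, h24, Ne.symm h24, h25, Ne.symm h25, h26, Ne.symm h26, h27, Ne.symm h27, h28, Ne.symm h28, h29, Ne.symm h29, h30, Ne.symm h30, h31, Ne.symm h31, h32, Ne.symm h32, h33, Ne.symm h33, h34, Ne.symm h34, h35, Ne.symm h35, h36, Ne.symm h36, h37, Ne.symm h37, h38, Ne.symm h38, h39, Ne.symm h39, h40, Ne.symm h40, h41, Ne.symm h41, h42, Ne.symm h42, h43, Ne.symm h43, h44, Ne.symm h44, h45, Ne.symm h45, h46, Ne.symm h46, h47, Ne.symm h47, h48, Ne.symm h48, h49, Ne.symm h49,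 h50, Ne.symm h50, h51, Ne.symm h51, h52, Ne.symm h52, h53, Ne.symm h53, h54, Ne.symm h54, h55, Ne.symm h55, h56, Ne.symm h56, h57, Ne.symm h57, h58, Ne.symm h58, h59, Ne.symm h59, h60, Ne.symm h60, h61, Ne.symm h61, h62, Ne.symm h62, h63, Ne.symm h63, h64, Ne.symm h64, h65, Ne.symm h65, h66, Ne.symm h66, h67, Ne.symm h67, h68, Ne.symm h68, h69, Ne.symm h69, h70, Ne.symm h70, h71, Ne.symm h71, h72, Ne.symm h72, h73, Ne.symm h73, h74, Ne.symm h74, h75, Ne.symm h75, h76, Ne.symm h76, h77, Ne.symm h77, h78, Ne.symm h78, h79, Ne.symm h79]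
    by_cases hr : PySem.Chars.startswith name.toList ['@', 'r', 'a', 'd', 'i', 'x', '-', 'u', 'i', '/'] = true <;>
    by_cases he : PySem.Chars.startswith name.toList ['@', 'e', 'm', 'o', 't', 'i', 'o', 'n', '/'] = true <;>
    by_cases ht : PySem.Chars.startswith name.toList ['@', 't', 'e', 's', 't', 'i', 'n', 'g', '-', 'l', 'i', 'b', 'r', 'a', 'r', 'y', '/'] = true <;>
    simp [hr, he, ht]
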